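-- pv_equiv track=rewrite | github.com/xujfcn/seomaster | auto_image.py | find_image_positions
-- ===== SOURCE A (Python) =====
-- from typing import List, Tuple
--
-- def find_image_positions(content: str, max_images: int = 3) -> List[Tuple[int, str]]:
--     """找到适合插入图片的位置（每篇文章最多3张）"""
--     lines = content.split('\n')
--     positions = []
--
--     # 跳过 frontmatter
--     in_frontmatter = False
--     start_idx = 0
--     for i, line in enumerate(lines):
--         if line.strip() == '---':
--             if not in_frontmatter:
--                 in_frontmatter = True
--             else:
--                 start_idx = i + 1
--                 break
--
--     # 找到主要的二级标题位置
--     for i in range(start_idx, len(lines)):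
--         line = lines[i]
--         if line.startswith('## ') and not line.startswith('###'):
--             # 获取这个段落的内容（用于生成图片提示词）
--             section_text = []
--             for j in range(i+1, min(i+10, len(lines))):
--                 if lines[j].startswith('#'):
--                     break
--                 section_text.append(lines[j])
--
--             positions.append((i, '\n'.join(section_text)))
--
--             if len(positions) >= max_images:
--                 break
--
--     return positions
-- ===== SOURCE B (Python) =====
-- from typing import List, Tuple
--
-- def find_image_positions(content: str, max_images: int = 3) -> List[Tuple[int, str]]:
--     lines = content.split('\n')
--     marks = [i for i, l in enumerate(lines) if l.strip() == '---']
--     start = marks[1] + 1 if len(marks) >= 2 else 0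
--
--     positions = []
--     idx = None          # heading index of the currently open section
--     buf = []            # its collected body lines
--     k = 0               # how many body lines collected (cap 9)
--     for i in range(start, len(lines)):
--         line = lines[i]
--         if idx is not None and (line.startswith('#') or k == 9):
--             positions.append((idx, '\n'.join(buf)))
--             idx = None
--             if len(positions) >= max_images:
--                 return positions
--         if idx is not None:
--             buf.append(line)
--             k += 1
--         elif line.startswith('## ') and not line.startswith('###'):
--             idx, buf, k = i, [], 0
--     if idx is not None:
--         positions.append((idx, '\n'.join(buf)))
--     return positions
-- ===== Notes on version B (the rewrite author's own statement) =====
-- stated objective: alternative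
-- what changed: Replaced A's outer index scan with a nested 9-line collection loop (and its two-flag frontmatter loop) by a single flat pass driven by an explicit open-section state machine (heading index, buffer, counter), with the frontmatter start computed from the list of delimiter-mark indices.
import Mathlib
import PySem

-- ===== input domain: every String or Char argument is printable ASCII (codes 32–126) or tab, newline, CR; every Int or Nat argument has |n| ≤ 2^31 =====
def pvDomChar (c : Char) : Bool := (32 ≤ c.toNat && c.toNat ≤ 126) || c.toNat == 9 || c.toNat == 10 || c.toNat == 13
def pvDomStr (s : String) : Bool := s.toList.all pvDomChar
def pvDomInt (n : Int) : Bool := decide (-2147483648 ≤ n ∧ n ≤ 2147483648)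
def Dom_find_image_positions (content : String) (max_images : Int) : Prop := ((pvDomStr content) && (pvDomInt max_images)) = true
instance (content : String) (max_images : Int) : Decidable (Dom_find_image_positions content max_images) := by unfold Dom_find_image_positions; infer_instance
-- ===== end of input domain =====

-- B is a single-pass state machine (open-section buffer + counter) instead of A's outer scan with a
-- nested 9-line collection loop; same return value (alternative decomposition, not claimed faster).

-- ===== PORT A =====
-- frontmatter skip: first '---' sets the flag, the second fixes start_idx = i+1 and breaks
def aFront : List String → Nat → Bool → Nat
  | [], _, _ => 0
  | l :: rest, i, inf =>
    if PySem.Str.strip l = "---" then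
      if !inf then aFront rest (i+1) true else i + 1
    else aFront rest (i+1) inf

-- inner loop: for j in range(i+1, min(i+10, len)): break on '#', else collect (fuel 9)
def aInner : List String → Nat → List String
  | _, 0 => []
  | [], _ => []
  | l :: rest, m + 1 =>
    if PySem.Str.startswith l "#" then [] else l :: aInner rest m

-- outer loop: for i in range(start_idx, len(lines)) over the suffix, with break once full
def aOuter (maxI : Int) : List String → Nat → List (Int × String) → List (Int × String)
  | [], _, pos => pos
  | l :: rest, i, pos =>
    if PySem.Str.startswith l "## " && !PySem.Str.startswith l "###" then
      let pos' := pos ++ [((i : Int), PySem.Str.join "\n" (aInner rest 9))]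
      if maxI ≤ (pos'.length : Int) then pos' else aOuter maxI rest (i+1) pos'
    else aOuter maxI rest (i+1) pos

def find_image_positions (content : String) (max_images : Int) : List (Int × String) :=
  let lines := (PySem.Str.split? content "\n").getD []
  let start := aFront lines 0 false
  aOuter max_images (lines.drop start) start []

-- ===== PORT B =====
-- B's frontmatter: indices of '---' lines; start = marks[1]+1 if at least two, else 0
def bMarks : List String → Nat → List Nat
  | [], _ => []
  | l :: rest, i =>
    if PySem.Str.strip l = "---" then i :: bMarks rest (i+1) else bMarks rest (i+1)

def bStart (marks : List Nat) : Nat :=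
  match marks with
  | _ :: m :: _ => m + 1
  | _ => 0

-- B's single flat pass: state = none (closed) or some (heading index, buffer, counter)
def bStep (maxI : Int) : List String → Nat → Option (Nat × List String × Nat) →
    List (Int × String) → List (Int × String)
  | [], _, st, res =>
    match st with
    | none => res
    | some (h, buf, _) => res ++ [((h : Int), PySem.Str.join "\n" buf)]
  | l :: rest, i, st, res =>
    match st with
    | some (h, buf, k) =>
      if PySem.Str.startswith l "#" || k == 9 then
        let res' := res ++ [((h : Int), PySem.Str.join "\n" buf)]
        if maxI ≤ (res'.length : Int) then res'
        else
          if PySem.Str.startswith l "## " && !PySem.Str.startswith l "###" then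
            bStep maxI rest (i+1) (some (i, [], 0)) res'
          else bStep maxI rest (i+1) none res'
      else bStep maxI rest (i+1) (some (h, buf ++ [l], k+1)) res
    | none =>
      if PySem.Str.startswith l "## " && !PySem.Str.startswith l "###" then
        bStep maxI rest (i+1) (some (i, [], 0)) res
      else bStep maxI rest (i+1) none res

def find_image_positions_alt (content : String) (max_images : Int) : List (Int × String) :=
  let lines := (PySem.Str.split? content "\n").getD []
  let start := bStart (bMarks lines 0)
  bStep max_images (lines.drop start) start none []

-- ===== PRECONDITION & SPEC =====
def Spec_find_image_positions (content : String) (max_images : Int) (out : List (Int × String)) : Prop := out = find_image_positions_alt content max_images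
instance (content : String) (max_images : Int) (out : List (Int × String)) : Decidable (Spec_find_image_positions content max_images out) := by unfold Spec_find_image_positions; infer_instance

-- ===== CLAIM (what is proved, stated in full; the proofs are below) =====
def Claim_equal_find_image_positions : Prop := ∀ (content : String) (max_images : Int), Dom_find_image_positions content max_images → Spec_find_image_positions content max_images (find_image_positions content max_images)

-- ===== LEMMAS AND PROOFS =====

theorem not_h2 (l : String) (h : PySem.Str.startswith l "#" = false) :
    PySem.Str.startswith l "## " = false := by
  rw [← Bool.not_eq_true] at h ⊢
  rw [PySem.Str.startswith_eq, PySem.Chars.startswith_iff] at h ⊢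
  intro hc
  exact h (List.IsPrefix.trans (by decide) hc)

-- frontmatter equivalence
theorem front_eq (lines : List String) :
    ∀ (i : Nat) (inf : Bool), aFront lines i inf =
      (if inf then (match bMarks lines i with | m :: _ => m + 1 | _ => 0)
       else bStart (bMarks lines i)) := by
  induction lines with
  | nil => intro i inf; cases inf <;> simp [aFront, bMarks, bStart]
  | cons l rest ih =>
    intro i inf
    by_cases h : PySem.Str.strip l = "---"
    · rw [show bMarks (l :: rest) i = i :: bMarks rest (i+1) from by simp [bMarks, h]]
      cases inf with
      | false =>
        rw [show aFront (l :: rest) i false = aFront rest (i+1) true from by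
              simp [aFront, h]]
        rw [ih (i+1) true, if_pos rfl, if_neg (by simp)]
        cases bMarks rest (i+1) <;> rfl
      | true =>
        rw [show aFront (l :: rest) i true = i + 1 from by simp [aFront, h], if_pos rfl]
    · rw [show bMarks (l :: rest) i = bMarks rest (i+1) from by simp [bMarks, h],
          show aFront (l :: rest) i inf = aFront rest (i+1) inf from by simp [aFront, h],
          ih (i+1) inf]

theorem aInner_take (rest : List String) : ∀ m, aInner rest m = rest.take (aInner rest m).length := by
  induction rest with
  | nil => intro m; cases m <;> simp [aInner]
  | cons l r ih =>
    intro m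
    cases m with
    | zero => simp [aInner]
    | succ m =>
      simp only [aInner]
      by_cases h : PySem.Str.startswith l "#" = true
      · rw [if_pos h]; rfl
      · rw [if_neg h]
        simp only [List.length_cons, List.take_succ_cons, List.cons.injEq, true_and]
        exact ih m

theorem aInner_no_hash (rest : List String) : ∀ m, ∀ l ∈ aInner rest m,
    PySem.Str.startswith l "#" = false := by
  induction rest with
  | nil => intro m; cases m <;> simp [aInner]
  | cons x r ih =>
    intro m
    cases m with
    | zero => simp [aInner]
    | succ m =>
      simp only [aInner]
      by_cases h : PySem.Str.startswith x "#" = true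
      · rw [if_pos h]; simp
      · rw [if_neg h]
        simp only [List.mem_cons]
        rintro l (rfl | hm)
        · exact Bool.not_eq_true _ ▸ (by revert h; cases PySem.Str.startswith l "#" <;> simp)
        · exact ih m l hm

-- A's outer loop skips lines that do not start with '#'
theorem aOuter_skip (maxI : Int) (body : List String)
    (hb : ∀ l ∈ body, PySem.Str.startswith l "#" = false) :
    ∀ (rest : List String) (i : Nat) (pos : List (Int × String)),
      aOuter maxI (body ++ rest) i pos = aOuter maxI rest (i + body.length) pos := by
  induction body with
  | nil => intro rest i pos; simp
  | cons l b ih =>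
    intro rest i pos
    have hl : PySem.Str.startswith l "#" = false := hb l (by simp)
    have hl2 : PySem.Str.startswith l "## " = false := not_h2 l hl
    have hb' : ∀ x ∈ b, PySem.Str.startswith x "#" = false := fun x hx => hb x (by simp [hx])
    show aOuter maxI (l :: (b ++ rest)) i pos = _
    rw [aOuter, if_neg (by rw [hl2]; simp), ih hb' rest (i+1) pos]
    congr 1
    simp; omega

theorem aInner_nil : ∀ m, aInner [] m = [] := by intro m; cases m <;> rfl

-- A may resume scanning right after the collected window: the window lines are skipped
theorem aOuter_resume (maxI : Int) (rest : List String) (m i : Nat) (pos : List (Int × String)) :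
    aOuter maxI rest i pos =
      aOuter maxI (rest.drop (aInner rest m).length) (i + (aInner rest m).length) pos := by
  conv_lhs => rw [← List.take_append_drop (aInner rest m).length rest, ← aInner_take rest m]
  rw [aOuter_skip maxI (aInner rest m) (aInner_no_hash rest m)]

-- main correspondence between B's state machine and A's nested loops
theorem main_corr (maxI : Int) : ∀ (rest : List String),
    (∀ (i : Nat) (res : List (Int × String)),
      bStep maxI rest i none res = aOuter maxI rest i res) ∧
    (∀ (i : Nat) (res : List (Int × String)) (h : Nat) (buf : List String) (k : Nat), k ≤ 9 →
      bStep maxI rest i (some (h, buf, k)) res =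
        (if maxI ≤ ((res ++ [((h : Int), PySem.Str.join "\n" (buf ++ aInner rest (9-k)))]).length : Int)
         then res ++ [((h : Int), PySem.Str.join "\n" (buf ++ aInner rest (9-k)))]
         else aOuter maxI (rest.drop (aInner rest (9-k)).length)
                (i + (aInner rest (9-k)).length)
                (res ++ [((h : Int), PySem.Str.join "\n" (buf ++ aInner rest (9-k)))]))) := by
  intro rest
  induction rest with
  | nil =>
    refine ⟨fun i res => rfl, fun i res h buf k _ => ?_⟩
    simp only [aInner_nil, List.append_nil, List.drop_nil]
    show res ++ [((h : Int), PySem.Str.join "\n" buf)] = _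
    split_ifs <;> rfl
  | cons l rest ih =>
    obtain ⟨ihC, ihO⟩ := ih
    have hC2 : ∀ (i : Nat) (res : List (Int × String)),
        bStep maxI (l :: rest) i none res = aOuter maxI (l :: rest) i res := by
      intro i res
      by_cases hH : (PySem.Str.startswith l "## " && !PySem.Str.startswith l "###") = true
      · rw [show bStep maxI (l :: rest) i none res =
              (if PySem.Str.startswith l "## " && !PySem.Str.startswith l "###" then
                bStep maxI rest (i+1) (some (i, [], 0)) res
              else bStep maxI rest (i+1) none res) from rfl,
            if_pos hH, aOuter, if_pos hH]
        rw [ihO (i+1) res i [] 0 (by omega)]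
        simp only [List.nil_append, Nat.sub_zero]
        by_cases hBr : maxI ≤ ((res ++ [((i : Int), PySem.Str.join "\n" (aInner rest 9))]).length : Int)
        · rw [if_pos hBr, if_pos hBr]
        · rw [if_neg hBr, if_neg hBr, aOuter_resume maxI rest 9 (i+1)]
      · rw [show bStep maxI (l :: rest) i none res =
              (if PySem.Str.startswith l "## " && !PySem.Str.startswith l "###" then
                bStep maxI rest (i+1) (some (i, [], 0)) res
              else bStep maxI rest (i+1) none res) from rfl,
            if_neg hH, aOuter, if_neg hH, ihC]
    refine ⟨hC2, ?_⟩
    intro i res h buf k hk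
    by_cases hF : (PySem.Str.startswith l "#" || (k == 9)) = true
    · have hbody : aInner (l :: rest) (9 - k) = [] := by
        rcases Nat.eq_or_lt_of_le hk with h9 | h9
        · rw [← h9]
          rw [show k - k = 0 from by omega]
          rfl
        · have hsw : PySem.Str.startswith l "#" = true := by
            rcases Bool.or_eq_true_iff.mp hF with hx | hx
            · exact hx
            · exact absurd (by simpa using hx : k = 9) (by omega)
          obtain ⟨m, hm⟩ : ∃ m, 9 - k = m + 1 := ⟨8 - k, by omega⟩
          rw [hm]; simp only [aInner]; rw [if_pos hsw]
      rw [show bStep maxI (l :: rest) i (some (h, buf, k)) res =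
            (if PySem.Str.startswith l "#" || k == 9 then
              (if maxI ≤ (((res ++ [((h : Int), PySem.Str.join "\n" buf)]).length : Nat) : Int) then
                res ++ [((h : Int), PySem.Str.join "\n" buf)]
              else bStep maxI (l :: rest) i none (res ++ [((h : Int), PySem.Str.join "\n" buf)]))
            else bStep maxI rest (i+1) (some (h, buf ++ [l], k+1)) res) from rfl,
          if_pos hF, hbody]
      simp only [List.append_nil, List.length_nil, List.drop_zero, Nat.add_zero]
      by_cases hBr : maxI ≤ ((res ++ [((h : Int), PySem.Str.join "\n" buf)]).length : Int)
      · rw [if_pos hBr, if_pos hBr]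
      · rw [if_neg hBr, if_neg hBr, hC2]
    · have hsw : PySem.Str.startswith l "#" = false := by
        cases hx : PySem.Str.startswith l "#" with
        | false => rfl
        | true => exact absurd (by rw [hx]; simp) hF
      have hk9 : k ≠ 9 := by intro e; exact hF (by simp [e])
      have hm : 9 - k = (9 - (k+1)) + 1 := by omega
      have hbody : aInner (l :: rest) (9 - k) = l :: aInner rest (9 - (k+1)) := by
        rw [hm]; simp only [aInner]; rw [if_neg (by rw [hsw]; simp)]
      rw [show bStep maxI (l :: rest) i (some (h, buf, k)) res =
            (if PySem.Str.startswith l "#" || k == 9 then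
              (if maxI ≤ (((res ++ [((h : Int), PySem.Str.join "\n" buf)]).length : Nat) : Int) then
                res ++ [((h : Int), PySem.Str.join "\n" buf)]
              else bStep maxI (l :: rest) i none (res ++ [((h : Int), PySem.Str.join "\n" buf)]))
            else bStep maxI rest (i+1) (some (h, buf ++ [l], k+1)) res) from rfl,
          if_neg hF, ihO (i+1) res h (buf ++ [l]) (k+1) (by omega), hbody,
          show buf ++ l :: aInner rest (9 - (k+1)) = (buf ++ [l]) ++ aInner rest (9 - (k+1)) from by simp]
      simp only [List.length_cons, List.drop_succ_cons]
      rw [show i + ((aInner rest (9 - (k+1))).length + 1) = (i+1) + (aInner rest (9 - (k+1))).length from by omega]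

theorem find_image_positions_spec : Claim_equal_find_image_positions := by
  intro content max_images _
  unfold Spec_find_image_positions find_image_positions find_image_positions_alt
  dsimp only
  rw [front_eq, if_neg (by simp)]
  exact ((main_corr max_images _).1 _ _).symm
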